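-- pv_equiv track=rewrite | github.com/ckoons/BubbleSpacetimeTheory | play/toy_985_spectral_line_verification.py | factorize_str
-- ===== SOURCE A (Python) =====
-- def is_7smooth(n):
--     if n <= 0: return False
--     if n == 1: return True
--     for p in [2, 3, 5, 7]:
--         while n % p == 0:
--             n //= p
--     return n == 1
--
-- def factorize_7smooth(n):
--     if not is_7smooth(n): return None
--     factors = {}
--     for p in [2, 3, 5, 7]:
--         while n % p == 0:
--             factors[p] = factors.get(p, 0) + 1
--             n //= p
--     return factors
--
-- def factorize_str(n):
--     f = factorize_7smooth(n)
--     if f is None: return f"[NOT 7-smooth: {n}]"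
--     parts = []
--     for p in [2, 3, 5, 7]:
--         if p in f:
--             parts.append(f"{p}^{f[p]}" if f[p] > 1 else str(p))
--     return " × ".join(parts)
-- ===== SOURCE B (Python) =====
-- def _val(m, p):
--     # binary valuation: exponent of p in m and the cofactor, by squaring p
--     if m % p != 0:
--         return 0, m
--     e, r = _val(m, p * p)
--     if r % p == 0:
--         return 2 * e + 1, r // p
--     return 2 * e, r
--
-- def factorize_str(n):
--     if n <= 0:
--         return f"[NOT 7-smooth: {n}]"
--     m = n
--     parts = []
--     for p in (2, 3, 5, 7):
--         e, m = _val(m, p)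
--         if e > 1:
--             parts.append(f"{p}^{e}")
--         elif e:
--             parts.append(str(p))
--     return " × ".join(parts) if m == 1 else f"[NOT 7-smooth: {n}]"
-- ===== Notes on version B (the rewrite author's own statement) =====
-- stated objective: alternative
-- what changed: B replaces A's linear trial division (run twice: once for the smoothness check, once to build a dict, plus a formatting pass) by a single pass that extracts each prime's exponent with a binary valuation: it recursively squares the prime (p, p^2, p^4, ...) so the exponent is found in O(log e) divisions, and formats each part inline.
import Mathlib
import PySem

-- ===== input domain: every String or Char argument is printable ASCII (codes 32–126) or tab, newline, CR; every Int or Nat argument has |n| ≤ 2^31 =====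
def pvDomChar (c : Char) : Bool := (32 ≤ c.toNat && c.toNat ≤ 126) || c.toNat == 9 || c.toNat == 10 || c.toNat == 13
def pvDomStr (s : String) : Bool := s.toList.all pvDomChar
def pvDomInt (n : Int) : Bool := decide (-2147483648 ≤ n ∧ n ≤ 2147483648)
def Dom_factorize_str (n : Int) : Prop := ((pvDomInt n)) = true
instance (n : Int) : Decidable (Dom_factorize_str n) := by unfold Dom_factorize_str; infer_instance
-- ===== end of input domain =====

-- B is one pass over (2,3,5,7) that extracts each exponent by a binary valuation
-- (recursively squaring the prime), replacing A's twice-run linear trial division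
-- and dict/formatting passes: a different algorithm of similar size.

-- ===== PORT A =====
-- inner 'while n % p == 0: n //= p' of is_7smooth (reached only with n ≥ 1, so Nat division is exact)
def pvStrip (p : Nat) (n : Nat) : Nat :=
  if h : 0 < n ∧ 2 ≤ p ∧ n % p = 0 then pvStrip p (n / p) else n
termination_by n
decreasing_by exact Nat.div_lt_self h.1 (by omega)

def pvIs7smooth (n : Int) : Bool :=
  if n ≤ 0 then false
  else if n = 1 then true
  else ([2, 3, 5, 7].foldl (fun m p => pvStrip p m) n.toNat) == 1

-- inner while of factorize_7smooth: 'factors[p] = factors.get(p, 0) + 1; n //= p'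
def pvFacLoop (p : Nat) (d : PySem.Dict Int Int) (n : Nat) : PySem.Dict Int Int × Nat :=
  if h : 0 < n ∧ 2 ≤ p ∧ n % p = 0 then
    pvFacLoop p (d.insert (p : Int) (d.getD (p : Int) 0 + 1)) (n / p)
  else (d, n)
termination_by n
decreasing_by exact Nat.div_lt_self h.1 (by omega)

def factorize_str (n : Int) : String :=
  if pvIs7smooth n then
    -- factorize_7smooth's dict (n ≥ 1 here, so .toNat is exact)
    let fd := ([2, 3, 5, 7].foldl (fun (st : PySem.Dict Int Int × Nat) p => pvFacLoop p st.1 st.2)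
                (PySem.Dict.empty, n.toNat)).1
    let parts := [2, 3, 5, 7].foldl (fun (parts : List String) (p : Nat) =>
      if fd.contains (p : Int) then
        parts ++ [if fd.getD (p : Int) 0 > 1 then
                    PySem.Int.toStr (p : Int) ++ "^" ++ PySem.Int.toStr (fd.getD (p : Int) 0)
                  else PySem.Int.toStr (p : Int)]
      else parts) []
    PySem.Str.join " × " parts
  else "[NOT 7-smooth: " ++ PySem.Int.toStr n ++ "]"

-- ===== PORT B =====
-- B's _val(m, p): binary valuation by squaring p. The extra '0 < m ∧ 2 ≤ p' in the
-- guard only makes the recursion total (always true on B's actual calls).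
def pvVal (m p : Nat) : Nat × Nat :=
  if h : m % p = 0 ∧ 0 < m ∧ 2 ≤ p then
    let r := pvVal m (p * p)
    if r.2 % p = 0 then (2 * r.1 + 1, r.2 / p) else (2 * r.1, r.2)
  else (0, m)
termination_by m + 1 - p
decreasing_by
  have hp : p ≤ m := Nat.le_of_dvd h.2.1 (Nat.dvd_of_mod_eq_zero h.1)
  have hpp : p < p * p := by nlinarith [h.2.2]
  omega

def factorize_str_alt (n : Int) : String :=
  if n ≤ 0 then "[NOT 7-smooth: " ++ PySem.Int.toStr n ++ "]"
  else
    let st := [2, 3, 5, 7].foldl (fun (st : Nat × List String) (p : Nat) =>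
        let r := pvVal st.1 p
        (r.2, if r.1 > 1 then
                st.2 ++ [PySem.Int.toStr (p : Int) ++ "^" ++ PySem.Int.toStr (r.1 : Int)]
              else if r.1 > 0 then st.2 ++ [PySem.Int.toStr (p : Int)]
              else st.2))
      (n.toNat, [])
    if st.1 = 1 then PySem.Str.join " × " st.2
    else "[NOT 7-smooth: " ++ PySem.Int.toStr n ++ "]"

-- ===== PRECONDITION & SPEC =====
def Spec_factorize_str (n : Int) (out : String) : Prop := out = factorize_str_alt n
instance (n : Int) (out : String) : Decidable (Spec_factorize_str n out) := by unfold Spec_factorize_str; infer_instance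

-- ===== CLAIM (what is proved, stated in full; the proofs are below) =====
def Claim_equal_factorize_str : Prop := ∀ (n : Int), Dom_factorize_str n → Spec_factorize_str n (factorize_str n)

-- ===== LEMMAS AND PROOFS =====

-- proof-side reference loop: linear valuation (exponent, cofactor)
def pvCountB (p : Nat) (e : Nat) (n : Nat) : Nat × Nat :=
  if h : 0 < n ∧ 2 ≤ p ∧ n % p = 0 then pvCountB p (e + 1) (n / p) else (e, n)
termination_by n
decreasing_by exact Nat.div_lt_self h.1 (by omega)

theorem countB_shift (p : Nat) (e n : Nat) :
    pvCountB p e n = (e + (pvCountB p 0 n).1, (pvCountB p 0 n).2) := by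
  induction n using Nat.strong_induction_on generalizing e with
  | _ n ih =>
    rw [pvCountB]
    conv_rhs => rw [pvCountB]
    split_ifs with h
    · rw [ih (n / p) (Nat.div_lt_self h.1 (by omega)) (e + 1),
        ih (n / p) (Nat.div_lt_self h.1 (by omega)) (0 + 1)]
      simp; omega
    · simp

theorem rem_eq_strip (p : Nat) (n : Nat) : (pvCountB p 0 n).2 = pvStrip p n := by
  induction n using Nat.strong_induction_on with
  | _ n ih =>
    rw [pvCountB, pvStrip]
    split_ifs with h
    · rw [countB_shift]
      exact ih (n / p) (Nat.div_lt_self h.1 (by omega))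
    · rfl

theorem facLoop_spec (p : Nat) (n : Nat) (d : PySem.Dict Int Int) :
    (pvFacLoop p d n).2 = (pvCountB p 0 n).2 ∧
    ∀ k : Int,
      ((pvFacLoop p d n).1.contains k
        = (d.contains k || (decide (k = (p : Int)) && decide (0 < (pvCountB p 0 n).1)))) ∧
      ((pvFacLoop p d n).1.getD k 0
        = d.getD k 0 + if k = (p : Int) then ((pvCountB p 0 n).1 : Int) else 0) := by
  induction n using Nat.strong_induction_on generalizing d with
  | _ n ih =>
    rw [pvFacLoop, pvCountB]
    split_ifs with h
    · obtain ⟨ih2, ihk⟩ := ih (n / p) (Nat.div_lt_self h.1 (by omega))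
        (d.insert (p : Int) (d.getD (p : Int) 0 + 1))
      simp only [Nat.zero_add]
      rw [countB_shift p 1 (n / p)]
      refine ⟨by simpa using ih2, fun k => ?_⟩
      obtain ⟨hc, hg⟩ := ihk k
      constructor
      · rw [hc, PySem.Dict.contains_insert]
        by_cases hk : k = (p : Int) <;> simp [hk]
      · rw [hg, PySem.Dict.getD_insert]
        by_cases hk : k = (p : Int) <;> simp [hk]
        ring
    · simp

-- characterisation of the linear valuation
theorem countB_spec (p n : Nat) (hp : 2 ≤ p) (hn : 0 < n) :
    n = p ^ (pvCountB p 0 n).1 * (pvCountB p 0 n).2 ∧ (pvCountB p 0 n).2 % p ≠ 0 := by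
  induction n using Nat.strong_induction_on with
  | _ n ih =>
    rw [pvCountB]
    split_ifs with h
    · rw [countB_shift]
      have hdn : 0 < n / p := Nat.div_pos (Nat.le_of_dvd h.1 (Nat.dvd_of_mod_eq_zero h.2.2)) (by omega)
      obtain ⟨he, hr⟩ := ih (n / p) (Nat.div_lt_self h.1 (by omega)) hdn
      refine ⟨?_, by simpa using hr⟩
      rw [show 0 + 1 + (pvCountB p 0 (n / p)).1 = (pvCountB p 0 (n / p)).1 + 1 from by omega,
        pow_succ]
      calc n = p * (n / p) := (Nat.mul_div_cancel' (Nat.dvd_of_mod_eq_zero h.2.2)).symm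
        _ = p * (p ^ (pvCountB p 0 (n / p)).1 * (pvCountB p 0 (n / p)).2) := by rw [← he]
        _ = p ^ (pvCountB p 0 (n / p)).1 * p * (pvCountB p 0 (n / p)).2 := by ring
    · exact ⟨by simp, fun hmod => h ⟨hn, hp, hmod⟩⟩

-- characterisation of B's binary valuation (same spec), by induction on the fuel m+1-p
theorem val_spec_aux (k : Nat) : ∀ m p, m + 1 - p ≤ k → 2 ≤ p → 0 < m →
    m = p ^ (pvVal m p).1 * (pvVal m p).2 ∧ (pvVal m p).2 % p ≠ 0 := by
  induction k with
  | zero =>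
    intro m p hk hp hm
    have hpm : m < p := by omega
    rw [pvVal, dif_neg (by
      rintro ⟨h1, -, -⟩
      exact absurd (Nat.le_of_dvd hm (Nat.dvd_of_mod_eq_zero h1)) (by omega))]
    exact ⟨by simp, by rw [Nat.mod_eq_of_lt hpm]; omega⟩
  | succ k ih =>
    intro m p hk hp hm
    rw [pvVal]
    by_cases hg : m % p = 0 ∧ 0 < m ∧ 2 ≤ p
    · rw [dif_pos hg]
      have hpm : p ≤ m := Nat.le_of_dvd hm (Nat.dvd_of_mod_eq_zero hg.1)
      have hpp : p < p * p := by nlinarith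
      obtain ⟨hE, hR⟩ := ih m (p * p) (by omega) (by nlinarith) hm
      have hsq : (p * p) ^ (pvVal m (p * p)).1 = p ^ (2 * (pvVal m (p * p)).1) := by
        rw [two_mul, pow_add, ← mul_pow]
      by_cases h0 : (pvVal m (p * p)).2 % p = 0
      · rw [if_pos h0]
        have hdvd : p ∣ (pvVal m (p * p)).2 := Nat.dvd_of_mod_eq_zero h0
        have hRe : (pvVal m (p * p)).2 = p * ((pvVal m (p * p)).2 / p) :=
          (Nat.mul_div_cancel' hdvd).symm
        refine ⟨?_, ?_⟩
        · calc m = (p * p) ^ (pvVal m (p * p)).1 * (pvVal m (p * p)).2 := hE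
            _ = p ^ (2 * (pvVal m (p * p)).1) * (p * ((pvVal m (p * p)).2 / p)) := by
                rw [hsq, ← hRe]
            _ = p ^ (2 * (pvVal m (p * p)).1 + 1) * ((pvVal m (p * p)).2 / p) := by
                rw [pow_succ]; ring
        · intro hbad
          apply hR
          have hbad' : ((pvVal m (p * p)).2 / p) % p = 0 := hbad
          obtain ⟨t, ht⟩ := Nat.dvd_of_mod_eq_zero hbad'
          have hsplit : (pvVal m (p * p)).2 = p * p * t := by rw [hRe, ht]; ring
          rw [hsplit]
          exact Nat.mul_mod_right _ _
      · rw [if_neg h0]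
        exact ⟨by rw [← hsq]; exact hE, h0⟩
    · rw [dif_neg hg]
      refine ⟨by simp, fun hmod => hg ⟨hmod, hm, hp⟩⟩

theorem val_spec (m p : Nat) (hp : 2 ≤ p) (hm : 0 < m) :
    m = p ^ (pvVal m p).1 * (pvVal m p).2 ∧ (pvVal m p).2 % p ≠ 0 :=
  val_spec_aux (m + 1 - p) m p le_rfl hp hm

-- uniqueness of (exponent, cofactor) pairs
theorem pow_cofactor_unique (p : Nat) (hp : 2 ≤ p) :
    ∀ e f r s : Nat, r % p ≠ 0 → s % p ≠ 0 → p ^ e * r = p ^ f * s → e = f ∧ r = s := by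
  intro e
  induction e with
  | zero =>
    intro f r s hr hs heq
    cases f with
    | zero => simpa using heq
    | succ f =>
      exfalso
      apply hr
      have hd : p ∣ r := ⟨p ^ f * s, by rw [show r = p ^ (f + 1) * s from by simpa using heq]; ring⟩
      exact Nat.mod_eq_zero_of_dvd hd
  | succ e ih =>
    intro f r s hr hs heq
    cases f with
    | zero =>
      exfalso
      apply hs
      have hd : p ∣ s := ⟨p ^ e * r, by rw [show s = p ^ (e + 1) * r from by simpa using heq.symm]; ring⟩
      exact Nat.mod_eq_zero_of_dvd hd
    | succ f =>
      have hcancel : p ^ e * r = p ^ f * s := by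
        have : p * (p ^ e * r) = p * (p ^ f * s) := by
          rw [show p * (p ^ e * r) = p ^ (e + 1) * r from by ring,
            show p * (p ^ f * s) = p ^ (f + 1) * s from by ring]
          exact heq
        exact Nat.eq_of_mul_eq_mul_left (by omega) this
      obtain ⟨h1, h2⟩ := ih f r s hr hs hcancel
      exact ⟨by omega, h2⟩

theorem val_eq_countB (m p : Nat) (hp : 2 ≤ p) : pvVal m p = pvCountB p 0 m := by
  rcases Nat.eq_zero_or_pos m with h0 | h0
  · subst h0
    rw [pvVal, pvCountB]
    simp
  · obtain ⟨hv1, hv2⟩ := val_spec m p hp h0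
    obtain ⟨hc1, hc2⟩ := countB_spec p m hp h0
    obtain ⟨he, hr⟩ := pow_cofactor_unique p hp _ _ _ _ hv2 hc2 (hv1.symm.trans hc1)
    exact Prod.ext he hr

theorem strip_chain (n0 : Nat) :
    ([2, 3, 5, 7] : List Nat).foldl (fun m p => pvStrip p m) n0
      = (pvCountB 7 0 (pvCountB 5 0 (pvCountB 3 0 (pvCountB 2 0 n0).2).2).2).2 := by
  simp only [List.foldl]
  rw [← rem_eq_strip 7, ← rem_eq_strip 5, ← rem_eq_strip 3, ← rem_eq_strip 2]

theorem smooth_eq (n : Int) (h : 0 < n) :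
    pvIs7smooth n
      = ((pvCountB 7 0 (pvCountB 5 0 (pvCountB 3 0 (pvCountB 2 0 n.toNat).2).2).2).2 == 1) := by
  rw [pvIs7smooth, if_neg (by omega)]
  by_cases h1 : n = 1
  · rw [if_pos h1, h1]
    have v2 : pvCountB 2 0 (1 : Int).toNat = (0, 1) := by rw [pvCountB]; norm_num
    have v3 : pvCountB 3 0 (1 : Nat) = (0, 1) := by rw [pvCountB]; norm_num
    have v5 : pvCountB 5 0 (1 : Nat) = (0, 1) := by rw [pvCountB]; norm_num
    have v7 : pvCountB 7 0 (1 : Nat) = (0, 1) := by rw [pvCountB]; norm_num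
    rw [v2]
    norm_num [v3, v5, v7]
  · rw [if_neg h1, strip_chain]

theorem foldB (n0 : Nat) :
    ([2,3,5,7] : List Nat).foldl (fun (st : Nat × List String) (p : Nat) =>
        let r := pvVal st.1 p
        (r.2, if r.1 > 1 then
                st.2 ++ [PySem.Int.toStr (p : Int) ++ "^" ++ PySem.Int.toStr (r.1 : Int)]
              else if r.1 > 0 then st.2 ++ [PySem.Int.toStr (p : Int)]
              else st.2)) (n0, [])
    = ((pvCountB 7 0 (pvCountB 5 0 (pvCountB 3 0 (pvCountB 2 0 n0).2).2).2).2, (if (pvCountB 2 0 n0).1 > 0 then [if (pvCountB 2 0 n0).1 > 1 then PySem.Int.toStr (2 : Int) ++ "^" ++ PySem.Int.toStr (((pvCountB 2 0 n0).1 : Nat) : Int) else PySem.Int.toStr (2 : Int)] else ([] : List String)) ++ (if (pvCountB 3 0 (pvCountB 2 0 n0).2).1 > 0 then [if (pvCountB 3 0 (pvCountB 2 0 n0).2).1 > 1 then PySem.Int.toStr (3 : Int) ++ "^" ++ PySem.Int.toStr (((pvCountB 3 0 (pvCountB 2 0 n0).2).1 : Nat) : Int) else PySem.Int.toStr (3 :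 Int)] else ([] : List String)) ++ (if (pvCountB 5 0 (pvCountB 3 0 (pvCountB 2 0 n0).2).2).1 > 0 then [if (pvCountB 5 0 (pvCountB 3 0 (pvCountB 2 0 n0).2).2).1 > 1 then PySem.Int.toStr (5 : Int) ++ "^" ++ PySem.Int.toStr (((pvCountB 5 0 (pvCountB 3 0 (pvCountB 2 0 n0).2).2).1 : Nat) : Int) else PySem.Int.toStr (5 : Int)] else ([] : List String)) ++ (if (pvCountB 7 0 (pvCountB 5 0 (pvCountB 3 0 (pvCountB 2 0 n0).2).2).2).1 > 0 then [if (pvCountB 7 0 (pvCountB 5 0 (pvCountB 3 0 (pvCountB 2 0 n0).2).2).2).1 > 1 then PySem.Int.toStr (7 : Int) ++ "^" ++ PySem.Int.toStr (((pvCountB 7 0 (pvCountB 5 0 (pvCountB 3 0 (pvCountB 2 0 n0).2).2).2).1 : Nat) : Int) else PySem.Int.toStr (7 : Int)] else ([] : List String))) := by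
  have h2 : ∀ m, pvVal m 2 = pvCountB 2 0 m := fun m => val_eq_countB m 2 (by norm_num)
  have h3 : ∀ m, pvVal m 3 = pvCountB 3 0 m := fun m => val_eq_countB m 3 (by norm_num)
  have h5 : ∀ m, pvVal m 5 = pvCountB 5 0 m := fun m => val_eq_countB m 5 (by norm_num)
  have h7 : ∀ m, pvVal m 7 = pvCountB 7 0 m := fun m => val_eq_countB m 7 (by norm_num)
  have ifparts : ∀ (e : Nat) (a b : String) (acc : List String),
      (if e > 1 then acc ++ [a] else if e > 0 then acc ++ [b] else acc)
        = acc ++ (if e > 0 then [if e > 1 then a else b] else []) := by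
    intro e a b acc
    split_ifs <;> first | rfl | omega | simp
  simp only [List.foldl_cons, List.foldl_nil, h2, h3, h5, h7, ifparts]
  simp [List.append_assoc]

theorem dictA (n0 : Nat) :
    (((([2,3,5,7] : List Nat).foldl (fun (st : PySem.Dict Int Int × Nat) p => pvFacLoop p st.1 st.2) (PySem.Dict.empty, n0)).1).contains (2 : Int) = decide (0 < (pvCountB 2 0 n0).1)) ∧
    (((([2,3,5,7] : List Nat).foldl (fun (st : PySem.Dict Int Int × Nat) p => pvFacLoop p st.1 st.2) (PySem.Dict.empty, n0)).1).getD (2 : Int) 0 = ((pvCountB 2 0 n0).1 : Int)) ∧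
    (((([2,3,5,7] : List Nat).foldl (fun (st : PySem.Dict Int Int × Nat) p => pvFacLoop p st.1 st.2) (PySem.Dict.empty, n0)).1).contains (3 : Int) = decide (0 < (pvCountB 3 0 (pvCountB 2 0 n0).2).1)) ∧
    (((([2,3,5,7] : List Nat).foldl (fun (st : PySem.Dict Int Int × Nat) p => pvFacLoop p st.1 st.2) (PySem.Dict.empty, n0)).1).getD (3 : Int) 0 = ((pvCountB 3 0 (pvCountB 2 0 n0).2).1 : Int)) ∧
    (((([2,3,5,7] : List Nat).foldl (fun (st : PySem.Dict Int Int × Nat) p => pvFacLoop p st.1 st.2) (PySem.Dict.empty, n0)).1).contains (5 : Int) = decide (0 < (pvCountB 5 0 (pvCountB 3 0 (pvCountB 2 0 n0).2).2).1)) ∧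
    (((([2,3,5,7] : List Nat).foldl (fun (st : PySem.Dict Int Int × Nat) p => pvFacLoop p st.1 st.2) (PySem.Dict.empty, n0)).1).getD (5 : Int) 0 = ((pvCountB 5 0 (pvCountB 3 0 (pvCountB 2 0 n0).2).2).1 : Int)) ∧
    (((([2,3,5,7] : List Nat).foldl (fun (st : PySem.Dict Int Int × Nat) p => pvFacLoop p st.1 st.2) (PySem.Dict.empty, n0)).1).contains (7 : Int) = decide (0 < (pvCountB 7 0 (pvCountB 5 0 (pvCountB 3 0 (pvCountB 2 0 n0).2).2).2).1)) ∧
    (((([2,3,5,7] : List Nat).foldl (fun (st : PySem.Dict Int Int × Nat) p => pvFacLoop p st.1 st.2) (PySem.Dict.empty, n0)).1).getD (7 : Int) 0 = ((pvCountB 7 0 (pvCountB 5 0 (pvCountB 3 0 (pvCountB 2 0 n0).2).2).2).1 : Int)) := by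
  have F2 := facLoop_spec 2 n0 PySem.Dict.empty
  have F3 := facLoop_spec 3 ((pvCountB 2 0 n0).2) (pvFacLoop 2 PySem.Dict.empty n0).1
  have F5 := facLoop_spec 5 ((pvCountB 3 0 (pvCountB 2 0 n0).2).2) (pvFacLoop 3 (pvFacLoop 2 PySem.Dict.empty n0).1 (pvCountB 2 0 n0).2).1
  have F7 := facLoop_spec 7 ((pvCountB 5 0 (pvCountB 3 0 (pvCountB 2 0 n0).2).2).2) (pvFacLoop 5 (pvFacLoop 3 (pvFacLoop 2 PySem.Dict.empty n0).1 (pvCountB 2 0 n0).2).1 (pvCountB 3 0 (pvCountB 2 0 n0).2).2).1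
  simp only [List.foldl_cons, List.foldl_nil]
  rw [F2.1, F3.1, F5.1]
  refine ⟨?_, ?_, ?_, ?_, ?_, ?_, ?_, ?_⟩ <;>
    simp [(F7.2 2).1, (F7.2 2).2, (F7.2 3).1, (F7.2 3).2, (F7.2 5).1, (F7.2 5).2, (F7.2 7).1, (F7.2 7).2,
      (F5.2 2).1, (F5.2 2).2, (F5.2 3).1, (F5.2 3).2, (F5.2 5).1, (F5.2 5).2, (F5.2 7).1, (F5.2 7).2,
      (F3.2 2).1, (F3.2 2).2, (F3.2 3).1, (F3.2 3).2, (F3.2 5).1, (F3.2 5).2, (F3.2 7).1, (F3.2 7).2,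
      (F2.2 2).1, (F2.2 2).2, (F2.2 3).1, (F2.2 3).2, (F2.2 5).1, (F2.2 5).2, (F2.2 7).1, (F2.2 7).2]

theorem foldAparts (fd : PySem.Dict Int Int) (e2 e3 e5 e7 : Nat)
    (h2c : fd.contains (2 : Int) = decide (0 < e2)) (h2g : fd.getD (2 : Int) 0 = (e2 : Int))
    (h3c : fd.contains (3 : Int) = decide (0 < e3)) (h3g : fd.getD (3 : Int) 0 = (e3 : Int))
    (h5c : fd.contains (5 : Int) = decide (0 < e5)) (h5g : fd.getD (5 : Int) 0 = (e5 : Int))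
    (h7c : fd.contains (7 : Int) = decide (0 < e7)) (h7g : fd.getD (7 : Int) 0 = (e7 : Int)) :
    ([2,3,5,7] : List Nat).foldl (fun (parts : List String) (p : Nat) =>
      if fd.contains (p : Int) then
        parts ++ [if fd.getD (p : Int) 0 > 1 then
                    PySem.Int.toStr (p : Int) ++ "^" ++ PySem.Int.toStr (fd.getD (p : Int) 0)
                  else PySem.Int.toStr (p : Int)]
      else parts) []
    = (if e2 > 0 then [if e2 > 1 then PySem.Int.toStr (2 : Int) ++ "^" ++ PySem.Int.toStr ((e2 : Nat) : Int) else PySem.Int.toStr (2 : Int)] else ([] : List String)) ++ (if e3 > 0 then [if e3 > 1 then PySem.Int.toStr (3 : Int) ++ "^" ++ PySem.Int.toStr ((e3 : Nat) : Int) else PySem.Int.toStr (3 : Int)] else ([] : List String)) ++ (if e5 > 0 then [if e5 > 1 then PySem.Int.toStr (5 : Int) ++ "^" ++ PySem.Int.toStr ((e5 : Nat) : Int) else PySem.Int.toStr (5 : Int)] else ([] : List String)) ++ (if e7 > 0 then [if e7 > 1 then PySem.Int.toStr (7 : Int) ++ "^" ++ PySem.Int.toStr ((e7 : Nat) : Int)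 else PySem.Int.toStr (7 : Int)] else ([] : List String)) := by
  simp only [List.foldl_cons, List.foldl_nil, Nat.cast_ofNat]
  rw [h2c, h2g, h3c, h3g, h5c, h5g, h7c, h7g]
  simp only [decide_eq_true_eq, gt_iff_lt, Nat.one_lt_cast]
  split_ifs <;> simp

-- ===== VERDICT (by name: the statement is the Claim_ definition above) =====
theorem factorize_str_spec : Claim_equal_factorize_str := by
  intro n _
  unfold Spec_factorize_str
  by_cases hneg : n ≤ 0
  · simp [factorize_str, factorize_str_alt, pvIs7smooth, hneg]
  · obtain ⟨d2c, d2g, d3c, d3g, d5c, d5g, d7c, d7g⟩ := dictA n.toNat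
    have hP := foldAparts _ _ _ _ _ d2c d2g d3c d3g d5c d5g d7c d7g
    simp only [factorize_str, factorize_str_alt, smooth_eq n (by omega), foldB n.toNat]
    rw [if_neg hneg, hP]
    by_cases hone : (pvCountB 7 0 (pvCountB 5 0 (pvCountB 3 0 (pvCountB 2 0 n.toNat).2).2).2).2 = 1
    · rw [hone]
      simp
    · simp [hone]
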